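-- pv_equiv track=rewrite | github.com/pypi-data/pypi-mirror-367 | packages/rcabench-platform/rcabench_platform-0.3.24-py3-none-any.whl/rcabench_platform/v2/metrics/dataset_loader.py | _is_golden_signal_metric
-- ===== SOURCE A (Python) =====
-- def _is_golden_signal_metric(metric_name: str) -> bool:
--     _GOLDEN_SIGNAL_METRICS = {
--         "latency": [
--             "http.client.request.duration",
--             "http.server.request.duration",
--             "db.client.connections.use_time",
--             "db.client.connections.create_time",
--             "db.client.connections.wait_time",
--             "jvm.gc.duration",
--         ],
--         "traffic": [
--             "hubble_flows_processed_total",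
--             "processedSpans",
--             "processedLogs",
--             "hubble_icmp_total",
--             "hubble_port_distribution_total",
--             "hubble_tcp_flags_total",
--             "otlp.exporter.seen",
--             "otlp.exporter.exported",
--             "k8s.pod.network.io",
--         ],
--         "error": [
--             "hubble_drop_total",
--             "k8s.pod.network.errors",
--             "k8s.container.restarts",
--         ],
--         "saturation": [
--             "container.cpu.usage",
--             "k8s.pod.cpu.usage",
--             "k8s.pod.cpu_limit_utilization",
--             "k8s.pod.cpu.node.utilization",
--             "jvm.cpu.recent_utilization",
--             "jvm.system.cpu.utilization",
--             "jvm.system.cpu.load_1m",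
--             "container.memory.usage",
--             "k8s.pod.memory.usage",
--             "k8s.pod.memory_limit_utilization",
--             "k8s.pod.memory.node.utilization",
--             "container.memory.working_set",
--             "k8s.pod.memory.working_set",
--             "jvm.memory.used",
--             "container.filesystem.usage",
--             "k8s.pod.filesystem.usage",
--             "queueSize",
--         ],
--     }
--     for metrics_list in _GOLDEN_SIGNAL_METRICS.values():
--         if metric_name in metrics_list:
--             return True
--         for metric in metrics_list:
--             if metric in metric_name:
--                 return True
--     return False
-- ===== SOURCE B (Python) =====
-- # Golden-signal candidates indexed by their first character: scan the name
-- # position by position and only prefix-test the candidates that can start there.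
-- _CANDIDATES_BY_FIRST_CHAR = {
--     "h": (
--         "http.client.request.duration",
--         "http.server.request.duration",
--         "hubble_flows_processed_total",
--         "hubble_icmp_total",
--         "hubble_port_distribution_total",
--         "hubble_tcp_flags_total",
--         "hubble_drop_total",
--     ),
--     "d": (
--         "db.client.connections.use_time",
--         "db.client.connections.create_time",
--         "db.client.connections.wait_time",
--     ),
--     "j": (
--         "jvm.gc.duration",
--         "jvm.cpu.recent_utilization",
--         "jvm.system.cpu.utilization",
--         "jvm.system.cpu.load_1m",
--         "jvm.memory.used",
--     ),
--     "p": (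
--         "processedSpans",
--         "processedLogs",
--     ),
--     "o": (
--         "otlp.exporter.seen",
--         "otlp.exporter.exported",
--     ),
--     "k": (
--         "k8s.pod.network.io",
--         "k8s.pod.network.errors",
--         "k8s.container.restarts",
--         "k8s.pod.cpu.usage",
--         "k8s.pod.cpu_limit_utilization",
--         "k8s.pod.cpu.node.utilization",
--         "k8s.pod.memory.usage",
--         "k8s.pod.memory_limit_utilization",
--         "k8s.pod.memory.node.utilization",
--         "k8s.pod.memory.working_set",
--         "k8s.pod.filesystem.usage",
--     ),
--     "c": (
--         "container.cpu.usage",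
--         "container.memory.usage",
--         "container.memory.working_set",
--         "container.filesystem.usage",
--     ),
--     "q": (
--         "queueSize",
--     ),
-- }
--
--
-- def _is_golden_signal_metric(metric_name: str) -> bool:
--     # Position-major scan: at each start position, try only the candidates
--     # whose first character matches; exact equality is the prefix case at 0.
--     for i, ch in enumerate(metric_name):
--         for candidate in _CANDIDATES_BY_FIRST_CHAR.get(ch, ()):
--             if metric_name.startswith(candidate, i):
--                 return True
--     return False
-- ===== Notes on version B (the rewrite author's own statement) =====
-- stated objective: alternative
-- what changed: A scans candidate-major over a dict of signal groups with a redundant exact-membership branch plus a substring test per candidate; B scans the metric name position-major, looking up at each position only the candidates indexed by that position's first character and doing a single prefix test there (exact equality is the prefix case at position 0).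
import Mathlib
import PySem

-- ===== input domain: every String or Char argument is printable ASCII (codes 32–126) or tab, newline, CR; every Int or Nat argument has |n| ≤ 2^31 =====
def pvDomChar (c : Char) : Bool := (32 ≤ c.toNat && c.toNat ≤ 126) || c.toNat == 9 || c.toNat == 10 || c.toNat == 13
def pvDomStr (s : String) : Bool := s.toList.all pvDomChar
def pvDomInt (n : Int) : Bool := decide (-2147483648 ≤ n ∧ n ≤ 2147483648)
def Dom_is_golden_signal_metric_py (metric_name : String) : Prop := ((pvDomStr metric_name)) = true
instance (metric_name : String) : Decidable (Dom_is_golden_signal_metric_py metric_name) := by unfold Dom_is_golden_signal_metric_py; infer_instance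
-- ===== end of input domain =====

-- B replaces A's candidate-major nested scan (dict of signal groups, exact-membership
-- branch, then substring test per candidate) by a position-major scan of the metric
-- name with the candidates indexed by first character (objective: alternative).

-- ===== PORT A =====
-- A's dict of golden-signal metric lists, as an association list in insertion order.
def goldenSignalDict : PySem.Dict String (List String) :=
  PySem.Dict.ofList
  [("latency",
    ["http.client.request.duration",
     "http.server.request.duration",
     "db.client.connections.use_time",
     "db.client.connections.create_time",
     "db.client.connections.wait_time",
     "jvm.gc.duration"]),
   ("traffic",
    ["hubble_flows_processed_total",
     "processedSpans",
     "processedLogs",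
     "hubble_icmp_total",
     "hubble_port_distribution_total",
     "hubble_tcp_flags_total",
     "otlp.exporter.seen",
     "otlp.exporter.exported",
     "k8s.pod.network.io"]),
   ("error",
    ["hubble_drop_total",
     "k8s.pod.network.errors",
     "k8s.container.restarts"]),
   ("saturation",
    ["container.cpu.usage",
     "k8s.pod.cpu.usage",
     "k8s.pod.cpu_limit_utilization",
     "k8s.pod.cpu.node.utilization",
     "jvm.cpu.recent_utilization",
     "jvm.system.cpu.utilization",
     "jvm.system.cpu.load_1m",
     "container.memory.usage",
     "k8s.pod.memory.usage",
     "k8s.pod.memory_limit_utilization",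
     "k8s.pod.memory.node.utilization",
     "container.memory.working_set",
     "k8s.pod.memory.working_set",
     "jvm.memory.used",
     "container.filesystem.usage",
     "k8s.pod.filesystem.usage",
     "queueSize"])]

-- inner loop: 'for metric in metrics_list: if metric in metric_name: return True'
def goldenInnerLoop (metric_name : String) : List String → Bool
  | [] => false
  | metric :: rest =>
      if PySem.Str.isIn metric metric_name then true else goldenInnerLoop metric_name rest

-- outer loop over the dict's values, with the early returns
def goldenOuterLoop (metric_name : String) : List (List String) → Bool
  | [] => false
  | metrics_list :: rest =>
      if metrics_list.contains metric_name then true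
      else if goldenInnerLoop metric_name metrics_list then true
      else goldenOuterLoop metric_name rest

def is_golden_signal_metric_py (metric_name : String) : Bool :=
  goldenOuterLoop metric_name ((PySem.Dict.values goldenSignalDict))

-- ===== PORT B =====
-- B's literal dict indexing the candidates by their first character (the one-char
-- string keys of Source B are the characters iteration over the name yields → Char).
def byFirstChar : PySem.Dict Char (List String) :=
  PySem.Dict.ofList
  [('h',
    ["http.client.request.duration",
     "http.server.request.duration",
     "hubble_flows_processed_total",
     "hubble_icmp_total",
     "hubble_port_distribution_total",
     "hubble_tcp_flags_total",
     "hubble_drop_total"]),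
   ('d',
    ["db.client.connections.use_time",
     "db.client.connections.create_time",
     "db.client.connections.wait_time"]),
   ('j',
    ["jvm.gc.duration",
     "jvm.cpu.recent_utilization",
     "jvm.system.cpu.utilization",
     "jvm.system.cpu.load_1m",
     "jvm.memory.used"]),
   ('p',
    ["processedSpans",
     "processedLogs"]),
   ('o',
    ["otlp.exporter.seen",
     "otlp.exporter.exported"]),
   ('k',
    ["k8s.pod.network.io",
     "k8s.pod.network.errors",
     "k8s.container.restarts",
     "k8s.pod.cpu.usage",
     "k8s.pod.cpu_limit_utilization",
     "k8s.pod.cpu.node.utilization",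
     "k8s.pod.memory.usage",
     "k8s.pod.memory_limit_utilization",
     "k8s.pod.memory.node.utilization",
     "k8s.pod.memory.working_set",
     "k8s.pod.filesystem.usage"]),
   ('c',
    ["container.cpu.usage",
     "container.memory.usage",
     "container.memory.working_set",
     "container.filesystem.usage"]),
   ('q',
    ["queueSize"])]

-- inner loop: 'for candidate in …: if metric_name.startswith(candidate, i): return True'.
-- 'metric_name.startswith(candidate, i)' for 0 ≤ i is exactly
-- 'PySem.Chars.startswith (full.drop i) candidate.toList' (prefix test at position i).
def candLoop (full : List Char) (i : Nat) : List String → Bool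
  | [] => false
  | candidate :: rest =>
      if PySem.Chars.startswith (full.drop i) candidate.toList then true
      else candLoop full i rest

-- outer loop: 'for i, ch in enumerate(metric_name): …' (enumerate indices are ≥ 0,
-- read back as Nat positions via .toNat)
def posLoop (full : List Char) : List (Int × Char) → Bool
  | [] => false
  | (i, ch) :: rest =>
      if candLoop full i.toNat (byFirstChar.getD ch []) then true
      else posLoop full rest

def is_golden_signal_metric_py_alt (metric_name : String) : Bool :=
  posLoop metric_name.toList (PySem.List.enumerate metric_name.toList)

-- ===== PRECONDITION & SPEC =====
def Spec_is_golden_signal_metric_py (metric_name : String) (out : Bool) : Prop := out = is_golden_signal_metric_py_alt metric_name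
instance (metric_name : String) (out : Bool) : Decidable (Spec_is_golden_signal_metric_py metric_name out) := by unfold Spec_is_golden_signal_metric_py; infer_instance

-- ===== CLAIM (what is proved, stated in full; the proofs are below) =====
def Claim_equal_is_golden_signal_metric_py : Prop := ∀ (metric_name : String), Dom_is_golden_signal_metric_py metric_name → Spec_is_golden_signal_metric_py metric_name (is_golden_signal_metric_py metric_name)

-- ===== LEMMAS AND PROOFS =====

-- the flat list of all 35 candidates = the flattened values of A's dict (proof helper)
def goldenFlat : List String := (PySem.Dict.values goldenSignalDict).flatten

theorem isIn_self (s : String) : PySem.Str.isIn s s = true := by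
  rw [PySem.Str.isIn_iff_infix]

theorem goldenInnerLoop_eq_any (m : String) (l : List String) :
    goldenInnerLoop m l = l.any (fun c => PySem.Str.isIn c m) := by
  induction l with
  | nil => rfl
  | cons x xs ih =>
      rw [goldenInnerLoop, List.any_cons, ih]
      cases h : PySem.Str.isIn x m <;> simp [h]

theorem contains_imp_any (m : String) (l : List String) (h : l.contains m = true) :
    l.any (fun c => PySem.Str.isIn c m) = true := by
  rw [List.any_eq_true]
  exact ⟨m, List.contains_iff_mem.mp h, isIn_self m⟩

-- A is the flat substring scan over goldenFlat
theorem goldenOuterLoop_eq_any (m : String) (ls : List (List String)) :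
    goldenOuterLoop m ls = (ls.flatten).any (fun c => PySem.Str.isIn c m) := by
  induction ls with
  | nil => rfl
  | cons l rest ih =>
      rw [goldenOuterLoop, List.flatten_cons, List.any_append, ← ih, ← goldenInnerLoop_eq_any]
      by_cases hc : l.contains m = true
      · have hin : goldenInnerLoop m l = true := by
          rw [goldenInnerLoop_eq_any]; exact contains_imp_any m l hc
        rw [if_pos hc, hin]; simp
      · rw [if_neg hc]
        cases h : goldenInnerLoop m l <;> simp [h]

theorem candLoop_eq_any (full : List Char) (i : Nat) (l : List String) :
    candLoop full i l = l.any (fun c => PySem.Chars.startswith (full.drop i) c.toList) := by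
  induction l with
  | nil => rfl
  | cons x xs ih =>
      rw [candLoop, List.any_cons, ih]
      cases h : PySem.Chars.startswith (full.drop i) x.toList <;> simp [h]

theorem posLoop_eq_any (full : List Char) (ps : List (Int × Char)) :
    posLoop full ps = ps.any (fun p => candLoop full p.1.toNat (byFirstChar.getD p.2 [])) := by
  induction ps with
  | nil => rfl
  | cons p rest ih =>
      obtain ⟨i, ch⟩ := p
      rw [posLoop, List.any_cons, ih]
      cases h : candLoop full i.toNat (byFirstChar.getD ch []) <;> simp [h]

-- any candidate looked up under first-char key ch is a golden candidate starting with ch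
theorem mem_byFirstChar (ch : Char) (cand : String)
    (h : cand ∈ byFirstChar.getD ch []) :
    cand ∈ goldenFlat ∧ cand.toList.head? = some ch := by
  rw [PySem.Dict.getD_eq_get?_getD] at h
  cases hg : byFirstChar.get? ch with
  | none => rw [hg] at h; simp at h
  | some l =>
      rw [hg] at h
      simp only [Option.getD_some] at h
      have hitems := PySem.Dict.mem_items_of_get?_eq_some byFirstChar hg
      fin_cases hitems <;> fin_cases h <;> decide

-- every golden candidate is non-empty and is filed under its own first character
theorem goldenFlat_back :
    goldenFlat.all (fun cand =>
      !cand.toList.isEmpty &&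
        (byFirstChar.getD (cand.toList.headD ' ') []).contains cand) = true := by
  decide

-- B = true iff some golden candidate is a substring
theorem alt_iff (m : String) :
    is_golden_signal_metric_py_alt m = true ↔
      ∃ cand ∈ goldenFlat, PySem.Str.isIn cand m = true := by
  rw [is_golden_signal_metric_py_alt, posLoop_eq_any, List.any_eq_true]
  constructor
  · rintro ⟨⟨i, ch⟩, hmem, hcand⟩
    rw [candLoop_eq_any, List.any_eq_true] at hcand
    obtain ⟨cand, hcm, hpre⟩ := hcand
    obtain ⟨hflat, _⟩ := mem_byFirstChar ch cand hcm
    refine ⟨cand, hflat, ?_⟩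
    rw [PySem.Str.isIn_eq, ← PySem.Chars.exists_prefix_drop_iff_isIn]
    exact ⟨i.toNat, (PySem.Chars.startswith_iff _ _).mp hpre⟩
  · rintro ⟨cand, hflat, hin⟩
    rw [PySem.Str.isIn_eq, ← PySem.Chars.exists_prefix_drop_iff_isIn] at hin
    obtain ⟨j, hpre⟩ := hin
    have hback := goldenFlat_back
    rw [List.all_eq_true] at hback
    have hb := hback cand hflat
    simp only [Bool.and_eq_true, Bool.not_eq_true'] at hb
    obtain ⟨hne, hcont⟩ := hb
    -- cand is non-empty, so the prefix pins down m.toList[j] = cand's first char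
    obtain ⟨c0, cs, hc0⟩ : ∃ c0 cs, cand.toList = c0 :: cs := by
      cases hcl : cand.toList with
      | nil => rw [hcl] at hne; simp at hne
      | cons a b => exact ⟨a, b, rfl⟩
    obtain ⟨t, ht⟩ := hpre
    have hdropj : m.toList.drop j = c0 :: (cs ++ t) := by
      rw [← ht, hc0]; simp
    have hjlt : j < m.toList.length := by
      by_contra hge
      have : m.toList.drop j = [] := List.drop_eq_nil_of_le (by omega)
      rw [this] at hdropj; simp at hdropj
    have hgetj : m.toList[j]? = some c0 := by
      rw [← List.head?_drop, hdropj]; rfl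
    refine ⟨((j : Int), c0), ?_, ?_⟩
    · rw [PySem.List.mem_enumerate_iff]
      refine ⟨j, hjlt, ?_⟩
      have := List.getElem?_eq_getElem hjlt
      rw [this] at hgetj
      simp only [Option.some.injEq] at hgetj
      simp [hgetj]
    · rw [candLoop_eq_any, List.any_eq_true]
      refine ⟨cand, ?_, ?_⟩
      · have : cand.toList.headD ' ' = c0 := by rw [hc0]; rfl
        rw [← this]
        exact List.contains_iff_mem.mp hcont
      · rw [PySem.Chars.startswith_iff]
        rw [Int.toNat_natCast]
        exact ⟨t, ht⟩

-- ===== VERDICT (by name: the statement is the Claim_ definition above) =====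
theorem is_golden_signal_metric_py_spec : Claim_equal_is_golden_signal_metric_py := by
  intro m _
  show is_golden_signal_metric_py m = is_golden_signal_metric_py_alt m
  rw [Bool.eq_iff_iff]
  rw [is_golden_signal_metric_py, goldenOuterLoop_eq_any, List.any_eq_true, alt_iff]
  rfl
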